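-- pv_equiv track=rewrite | github.com/oryon-dominik/tailwind-class-prefixer | application/parser/tailwind.py | build_classes
-- ===== SOURCE A (Python) =====
-- import string
--
-- def build_classes(classes: str) -> list:
--     """Build a list of all classes from the tailwind.config.js file."""
--     built = []
--     word = ""
--     for char in classes:
--         if char in list(string.ascii_letters) + list(string.digits) + ['-']:
--             word += char
--         else:
--             if word:
--                 built.append(word)
--                 word = ""
--             built.append(char)
--     if word:
--         built.append(word)
--     return built
-- ===== SOURCE B (Python) =====
-- def _is_word(c):
--     return ('a' <= c <= 'z') or ('A' <= c <= 'Z') or ('0' <= c <= '9') or c == '-'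
--
--
-- def build_classes(classes: str) -> list:
--     """Build a list of all classes from the tailwind.config.js file."""
--     built = []
--     i = 0
--     n = len(classes)
--     while i < n:
--         if _is_word(classes[i]):
--             j = i + 1
--             while j < n and _is_word(classes[j]):
--                 j += 1
--             built.append(classes[i:j])
--             i = j
--         else:
--             built.append(classes[i])
--             i += 1
--     return built
-- ===== Notes on version B (the rewrite author's own statement) =====
-- stated objective: faster
-- what changed: Replaces the per-character accumulator loop (which rebuilds the 63-element allowed-character list and extends the word string on every char) by a two-pointer scan that finds the end of each maximal word run with a cheap comparison test and slices it out in one step.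
import Mathlib
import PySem

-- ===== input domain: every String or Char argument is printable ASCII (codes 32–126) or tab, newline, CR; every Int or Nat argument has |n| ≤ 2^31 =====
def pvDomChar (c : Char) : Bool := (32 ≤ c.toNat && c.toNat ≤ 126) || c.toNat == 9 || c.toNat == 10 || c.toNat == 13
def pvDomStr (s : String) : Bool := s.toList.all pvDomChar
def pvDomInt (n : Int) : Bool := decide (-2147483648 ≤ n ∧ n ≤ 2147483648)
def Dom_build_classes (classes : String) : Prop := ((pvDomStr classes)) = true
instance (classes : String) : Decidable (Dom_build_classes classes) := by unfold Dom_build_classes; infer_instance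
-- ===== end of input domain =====

-- B replaces A's per-character word accumulator by a two-pointer scan that slices
-- out each maximal word run at once; a timing run measured B faster (constant factor).

-- ===== PORT A =====
-- 'char in list(string.ascii_letters) + list(string.digits) + ["-"]' — exact on ASCII
def isTW (c : Char) : Bool := c.isAlpha || c.isDigit || c == '-'

-- the for-loop of A: state (built, word); word kept as List Char ("" = []), flushed as String.mk
def buildAuxA : List Char → List String → List Char → List String
  | [], built, word => built ++ (if word = [] then [] else [String.mk word])
  | c :: cs, built, word =>
    if isTW c then
      buildAuxA cs built (word ++ [c])
    else
      buildAuxA cs (built ++ (if word = [] then [] else [String.mk word]) ++ [String.mk [c]]) []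

def build_classes (classes : String) : List String :=
  buildAuxA classes.toList [] []

-- ===== PORT B =====
-- B's outer while loop; the inner 'while j < n and _is_word' + slice is c :: takeWhile isTW
def tokB : List Char → List String
  | [] => []
  | c :: cs =>
    if isTW c then
      String.mk (c :: cs.takeWhile isTW) :: tokB (cs.dropWhile isTW)
    else
      String.mk [c] :: tokB cs
termination_by cs => cs.length
decreasing_by
  · exact Nat.lt_succ_of_le (List.length_dropWhile_le _ _)
  · exact Nat.lt_succ_self _

def build_classes_alt (classes : String) : List String :=
  tokB classes.toList

-- ===== PRECONDITION & SPEC =====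
def Spec_build_classes (classes : String) (out : List String) : Prop := out = build_classes_alt classes
instance (classes : String) (out : List String) : Decidable (Spec_build_classes classes out) := by unfold Spec_build_classes; infer_instance

-- ===== CLAIM (what is proved, stated in full; the proofs are below) =====
def Claim_equal_build_classes : Prop := ∀ (classes : String), Dom_build_classes classes → Spec_build_classes classes (build_classes classes)

-- ===== LEMMAS AND PROOFS =====
theorem tokB_nil : tokB [] = [] := by rw [tokB]

theorem tokB_cons (c : Char) (cs : List Char) :
    tokB (c :: cs) =
      if isTW c then String.mk (c :: cs.takeWhile isTW) :: tokB (cs.dropWhile isTW)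
      else String.mk [c] :: tokB cs := by rw [tokB]

theorem buildAuxA_built (cs : List Char) : ∀ (built : List String) (word : List Char),
    buildAuxA cs built word = built ++ buildAuxA cs [] word := by
  induction cs with
  | nil => intro built word; simp [buildAuxA]
  | cons c cs ih =>
    intro built word
    by_cases h : isTW c = true
    · simp only [buildAuxA, h, if_true]
      exact ih built (word ++ [c])
    · simp only [buildAuxA, h, Bool.false_eq_true, if_false]
      rw [ih ((built ++ (if word = [] then [] else [String.mk word])) ++ [String.mk [c]]) [],
          ih ((([] : List String) ++ (if word = [] then [] else [String.mk word])) ++ [String.mk [c]]) []]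
      simp

theorem buildAuxA_tok (cs : List Char) : ∀ (word : List Char),
    buildAuxA cs [] word =
      if word = [] then tokB cs
      else String.mk (word ++ cs.takeWhile isTW) :: tokB (cs.dropWhile isTW) := by
  induction cs with
  | nil =>
    intro word
    by_cases h : word = [] <;> simp [buildAuxA, tokB_nil, h]
  | cons c cs ih =>
    intro word
    by_cases hc : isTW c = true
    · simp only [buildAuxA, hc, if_true, ih (word ++ [c]), List.append_eq_nil_iff,
        List.cons_ne_self, and_false, if_false, List.takeWhile_cons, List.dropWhile_cons]
      by_cases h : word = []
      · simp [h, tokB_cons, hc]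
      · simp [h]
    · simp only [buildAuxA, hc, Bool.false_eq_true, if_false]
      rw [buildAuxA_built, ih []]
      by_cases h : word = []
      · simp [h, tokB_cons, hc]
      · simp [h, tokB_cons, hc]

-- ===== VERDICT (by name: the statement is the Claim_ definition above) =====
theorem build_classes_spec : Claim_equal_build_classes := by
  intro classes _
  unfold Spec_build_classes build_classes build_classes_alt
  rw [buildAuxA_tok]
  simp
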